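-- pv_equiv track=rewrite | github.com/Glebias/Support-System | lab3/main.py | minimize_implicants
-- ===== SOURCE A (Python) =====
-- from itertools import product, combinations
--
-- def expand_implicant(implicant_str):
--     vars_combinations = [
--         ''.join(bits) for bits in product('01', repeat=implicant_str.count('X'))
--     ]
--     results = []
--     for bits in vars_combinations:
--         term = list(implicant_str)
--         bit_index = 0
--         for i, ch in enumerate(implicant_str):
--             if ch == 'X':
--                 term[i] = bits[bit_index]
--                 bit_index += 1
--         results.append(''.join(term))
--     return results
--
-- def get_all_minterms(implicants_str):
--     all_minterms = set()
--     for impl in implicants_str: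
--         all_minterms.update(expand_implicant(impl))
--     return all_minterms
--
-- def find_essential_implicants(implicants_str, all_minterms):
--     coverage = {m: [] for m in all_minterms}
--     for idx, impl in enumerate(implicants_str):
--         for m in expand_implicant(impl):
--             coverage[m].append(idx)
--     essential_indices = set()
--     for m, idx_list in coverage.items():
--         if len(idx_list) == 1:
--             essential_indices.add(idx_list[0])
--     return sorted(list(essential_indices))
--
-- def minimize_implicants(implicants_str):
--     all_minterms = get_all_minterms(implicants_str)
--     essential_indices = find_essential_implicants(implicants_str, all_minterms)
--     essential_impls = [implicants_str[i] for i in essential_indices]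
--
--     covered_by_essential = set()
--     for i in essential_indices:
--         covered_by_essential.update(expand_implicant(implicants_str[i]))
--
--     remaining_minterms = list(all_minterms - covered_by_essential)
--     remaining_indices = [i for i in range(len(implicants_str)) if i not in essential_indices]
--
--     if not remaining_minterms:
--         return essential_impls
--
--     remaining_impls = [implicants_str[i] for i in remaining_indices]
--     for r in range(1, len(remaining_impls) + 1):
--         for combo in combinations(range(len(remaining_impls)), r):
--             covered = set()
--             for idx in combo:
--                 covered.update(expand_implicant(remaining_impls[idx]))
--             if set(remaining_minterms).issubset(covered):
--                 chosen_impls = [remaining_impls[i] for i in combo]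
--                 return essential_impls + chosen_impls
--
--     return implicants_str
-- ===== SOURCE B (Python) =====
-- from itertools import combinations
--
-- def _expand(s):
--     # recursive branching on the first character instead of product+substitution
--     if not s:
--         return ['']
--     rest = _expand(s[1:])
--     c = s[0]
--     if c == 'X':
--         return ['0' + t for t in rest] + ['1' + t for t in rest]
--     return [c + t for t in rest]
--
-- def minimize_implicants(implicants_str):
--     # each implicant's minterms computed exactly once, reused everywhere
--     exps = [_expand(s) for s in implicants_str]
--     counts = {}
--     for ms in exps:
--         for m in ms:
--             counts[m] = counts.get(m, 0) + 1
--     essential = sorted({i for i, ms in enumerate(exps)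
--                         if any(counts[m] == 1 for m in ms)})
--     covered = set()
--     for i in essential:
--         covered.update(exps[i])
--     remaining = {m for m in counts if m not in covered}
--     if not remaining:
--         return [implicants_str[i] for i in essential]
--     rest_idx = [i for i in range(len(implicants_str)) if i not in essential]
--     for r in range(1, len(rest_idx) + 1):
--         for combo in combinations(rest_idx, r):
--             cov = set()
--             for i in combo:
--                 cov.update(exps[i])
--             if remaining <= cov:
--                 return [implicants_str[i] for i in essential] + \
--                        [implicants_str[i] for i in combo]
--     return implicants_str
-- ===== Notes on version B (the rewrite author's own statement) =====
-- stated objective: alternative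
-- what changed: B expands each implicant into its minterm list exactly once (by recursive branching on the first 'X' instead of product-and-substitute), replaces A's per-minterm coverage index lists with a single occurrence counter for essential detection, and reuses the cached expansions in the set-cover combination search instead of re-expanding implicants per combination.
import Mathlib
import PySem

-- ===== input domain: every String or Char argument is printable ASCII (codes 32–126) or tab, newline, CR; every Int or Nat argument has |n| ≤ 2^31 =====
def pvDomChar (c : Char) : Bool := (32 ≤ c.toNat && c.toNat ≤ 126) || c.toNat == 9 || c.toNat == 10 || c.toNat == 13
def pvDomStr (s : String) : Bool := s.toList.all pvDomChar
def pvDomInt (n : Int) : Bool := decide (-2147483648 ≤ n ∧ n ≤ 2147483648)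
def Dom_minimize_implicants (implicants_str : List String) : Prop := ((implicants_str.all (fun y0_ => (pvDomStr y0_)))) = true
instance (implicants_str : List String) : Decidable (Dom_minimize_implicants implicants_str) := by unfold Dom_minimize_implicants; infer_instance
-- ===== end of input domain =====

-- B computes every implicant's minterm list once (by recursive branching expansion) and reuses it
-- everywhere, replacing A's repeated re-expansion and per-minterm coverage index lists with a single
-- occurrence counter; objective: alternative (same exact result by a different decomposition).

-- ===== PORT A =====
-- product('01', repeat=k), first coordinate varying slowest (CPython order)
def pvBitCombos : Nat → List (List Char)
  | 0 => [[]]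
  | k+1 => (pvBitCombos k).map ('0' :: ·) ++ (pvBitCombos k).map ('1' :: ·)

-- the inner substitution loop of expand_implicant: bits[bit_index] consumption is modeled by
-- consuming the bits list (bit_index walks the bits left to right; exact since bits has one
-- entry per 'X'; the [] branch is unreachable on the calls made, where |bits| = count of 'X')
def pvSubstA : List Char → List Char → List Char
  | [], _ => []
  | c :: cs, bits =>
    if c = 'X' then
      match bits with
      | b :: bs => b :: pvSubstA cs bs
      | [] => c :: pvSubstA cs []
    else c :: pvSubstA cs bits

def pvExpandImplicantA (s : String) : List String :=
  (pvBitCombos (s.toList.count 'X')).map (fun bits => String.ofList (pvSubstA s.toList bits))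

def pvGetAllMinterms (implicants_str : List String) : PySem.Set String :=
  implicants_str.foldl (fun acc impl => PySem.Set.update acc (pvExpandImplicantA impl)) PySem.Set.empty

def pvFindEssentialA (implicants_str : List String) (all_minterms : PySem.Set String) : List Int :=
  let coverage0 : PySem.Dict String (List Int) :=
    all_minterms.foldl (fun d m => d.insert m []) PySem.Dict.empty
  let coverage :=
    (PySem.List.enumerate implicants_str).foldl
      (fun d p => (pvExpandImplicantA p.2).foldl (fun d m => d.modify m [] (· ++ [p.1])) d) coverage0
  let essSet : PySem.Set Int :=
    coverage.items.foldl (fun s p => if p.2.length = 1 then PySem.Set.add s (p.2.getD 0 0) else s)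
      PySem.Set.empty
  PySem.List.sorted essSet (fun x => x) false

def minimize_implicants (implicants_str : List String) : List String :=
  let all_minterms := pvGetAllMinterms implicants_str
  let essential_indices := pvFindEssentialA implicants_str all_minterms
  let essential_impls := essential_indices.map (fun i => PySem.List.pyGetD implicants_str i "")
  let covered_by_essential :=
    essential_indices.foldl
      (fun acc i => PySem.Set.update acc (pvExpandImplicantA (PySem.List.pyGetD implicants_str i "")))
      PySem.Set.empty
  let remaining_minterms := PySem.Set.diff all_minterms covered_by_essential
  let remaining_indices :=
    (PySem.List.pyRange 0 (PySem.List.len implicants_str) 1).filter (fun i => decide (i ∉ essential_indices))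
  if remaining_minterms = [] then essential_impls
  else
    let remaining_impls := remaining_indices.map (fun i => PySem.List.pyGetD implicants_str i "")
    let search :=
      (PySem.List.pyRange 1 (PySem.List.len remaining_impls + 1) 1).findSome? (fun r =>
        (PySem.List.combinations (PySem.List.pyRange 0 (PySem.List.len remaining_impls) 1) r.toNat).findSome?
          (fun combo =>
            let covered :=
              combo.foldl
                (fun acc idx => PySem.Set.update acc (pvExpandImplicantA (PySem.List.pyGetD remaining_impls idx "")))
                PySem.Set.empty
            if PySem.Set.issubset (PySem.Set.ofList remaining_minterms) covered then
              some (combo.map (fun i => PySem.List.pyGetD remaining_impls i ""))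
            else none))
    match search with
    | some chosen => essential_impls ++ chosen
    | none => implicants_str

-- ===== PORT B =====
-- _expand: recursive branching on the first character (strings as char lists, joined at the end)
def pvExpandChars : List Char → List (List Char)
  | [] => [[]]
  | c :: cs =>
    let rest := pvExpandChars cs
    if c = 'X' then rest.map ('0' :: ·) ++ rest.map ('1' :: ·)
    else rest.map (c :: ·)

def pvExpand (s : String) : List String := (pvExpandChars s.toList).map String.ofList

def minimize_implicants_alt (implicants_str : List String) : List String :=
  let exps := implicants_str.map pvExpand
  let counts : PySem.Dict String Int :=
    exps.foldl (fun d ms => ms.foldl (fun d m => d.insert m (d.getD m 0 + 1)) d) PySem.Dict.empty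
  let essential :=
    PySem.List.sorted
      (PySem.Set.ofList
        (((PySem.List.enumerate exps).filter (fun p => p.2.any (fun m => counts.getD m 0 == 1))).map (·.1)))
      (fun x => x) false
  let covered :=
    essential.foldl (fun acc i => PySem.Set.update acc (PySem.List.pyGetD exps i [])) PySem.Set.empty
  let remaining : PySem.Set String :=
    PySem.Set.ofList (counts.keys.filter (fun m => !(PySem.Set.contains covered m)))
  if remaining = [] then essential.map (fun i => PySem.List.pyGetD implicants_str i "")
  else
    let rest_idx :=
      (PySem.List.pyRange 0 (PySem.List.len implicants_str) 1).filter (fun i => decide (i ∉ essential))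
    let search :=
      (PySem.List.pyRange 1 (PySem.List.len rest_idx + 1) 1).findSome? (fun r =>
        (PySem.List.combinations rest_idx r.toNat).findSome? (fun combo =>
          let cov :=
            combo.foldl (fun acc i => PySem.Set.update acc (PySem.List.pyGetD exps i [])) PySem.Set.empty
          if PySem.Set.issubset remaining cov then
            some (essential.map (fun i => PySem.List.pyGetD implicants_str i "") ++
                  combo.map (fun i => PySem.List.pyGetD implicants_str i ""))
          else none))
    match search with
    | some res => res
    | none => implicants_str

-- ===== PRECONDITION & SPEC =====
def Spec_minimize_implicants (implicants_str : List String) (out : List String) : Prop := out = minimize_implicants_alt implicants_str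
instance (implicants_str : List String) (out : List String) : Decidable (Spec_minimize_implicants implicants_str out) := by unfold Spec_minimize_implicants; infer_instance

-- ===== CLAIM (what is proved, stated in full; the proofs are below) =====
def Claim_equal_minimize_implicants : Prop := ∀ (implicants_str : List String), Dom_minimize_implicants implicants_str → Spec_minimize_implicants implicants_str (minimize_implicants implicants_str)

-- ===== LEMMAS AND PROOFS =====

theorem pv_expandChars_eq (l : List Char) :
    (pvBitCombos (l.count 'X')).map (pvSubstA l) = pvExpandChars l := by
  induction l with
  | nil => rfl
  | cons c cs ih =>
    by_cases hc : c = 'X'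
    · subst hc
      rw [List.count_cons_self]
      have hB : pvExpandChars ('X' :: cs) = (pvExpandChars cs).map ('0' :: ·) ++ (pvExpandChars cs).map ('1' :: ·) := by
        simp [pvExpandChars]
      rw [hB, pvBitCombos, ← ih]
      simp only [List.map_append, List.map_map]
      congr 1
    · rw [List.count_cons_of_ne hc]
      have hB : pvExpandChars (c :: cs) = (pvExpandChars cs).map (c :: ·) := by
        simp [pvExpandChars, hc]
      rw [hB, ← ih]
      simp only [List.map_map]
      exact List.map_congr_left (fun bs _ => by simp [pvSubstA, Function.comp, hc])

theorem pv_expand_eq (s : String) : pvExpandImplicantA s = pvExpand s := by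
  unfold pvExpandImplicantA pvExpand
  rw [← pv_expandChars_eq, List.map_map]
  rfl

theorem pv_enum_cons {α : Type} (x : α) (t : List α) (s : Int) :
    PySem.List.enumerate (x :: t) s = (s, x) :: PySem.List.enumerate t (s + 1) := rfl

theorem pv_mem_enum {α : Type} (l : List α) (s : Int) (p : Int × α) :
    p ∈ PySem.List.enumerate l s ↔ ∃ j : ℕ, ∃ h : j < l.length, p = (s + j, l[j]) := by
  induction l generalizing s with
  | nil => simp [PySem.List.enumerate]
  | cons x t ih =>
    rw [pv_enum_cons]
    simp only [List.mem_cons, ih]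
    constructor
    · rintro (rfl | ⟨j, h, rfl⟩)
      · exact ⟨0, by simp, by simp⟩
      · exact ⟨j + 1, by simpa using h, by simp; omega⟩
    · rintro ⟨j, h, rfl⟩
      cases j with
      | zero => left; simp
      | succ j => right; exact ⟨j, by simpa using h, by simp; omega⟩

theorem pv_enum_map_snd {α : Type} (l : List α) (s : Int) :
    (PySem.List.enumerate l s).map (·.2) = l := by
  induction l generalizing s with
  | nil => rfl
  | cons x t ih => rw [pv_enum_cons]; simp [ih]

def pvExps (xs : List String) : List (List String) := xs.map pvExpand
def pvMems (xs : List String) : List String := (pvExps xs).flatten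
def pvCounts (xs : List String) : PySem.Dict String Int :=
  (pvExps xs).foldl (fun d ms => ms.foldl (fun d m => d.insert m (d.getD m 0 + 1)) d) PySem.Dict.empty
def pvEssB (xs : List String) : List Int :=
  PySem.List.sorted
    (PySem.Set.ofList
      (((PySem.List.enumerate (pvExps xs)).filter (fun p => p.2.any (fun m => (pvCounts xs).getD m 0 == 1))).map (·.1)))
    (fun x => x) false
def pvPairs (xs : List String) : List (String × Int) :=
  (PySem.List.enumerate xs).flatMap (fun p => (pvExpand p.2).map (fun m => (m, p.1)))
def pvCovList (xs : List String) (m : String) : List Int :=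
  ((pvPairs xs).filter (fun q => q.1 == m)).map (·.2)
def pvCovDict (xs : List String) : PySem.Dict String (List Int) :=
  (PySem.List.enumerate xs).foldl
    (fun d p => (pvExpand p.2).foldl (fun d m => d.modify m [] (· ++ [p.1])) d)
    ((PySem.Set.ofList (pvMems xs)).foldl (fun d m => d.insert m []) PySem.Dict.empty)

theorem pv_counts_getD (xs : List String) (m : String) :
    (pvCounts xs).getD m 0 = ((pvMems xs).count m : Int) := by
  unfold pvCounts pvMems
  rw [← List.foldl_flatten, PySem.Dict.getD_foldl_insert_add_one]
  simp

theorem pv_counts_keys (xs : List String) :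
    (pvCounts xs).keys = PySem.Set.ofList (pvMems xs) := by
  unfold pvCounts pvMems
  rw [← List.foldl_flatten, PySem.Dict.keys_foldl_insert]
  rw [PySem.Dict.keys_empty, PySem.Set.update_nil_left]

theorem pv_foldl_update {α : Type} [BEq α] (L : List (List α)) (s0 : PySem.Set α) :
    L.foldl (fun s ms => PySem.Set.update s ms) s0 = PySem.Set.update s0 L.flatten := by
  induction L generalizing s0 with
  | nil => rfl
  | cons ms L ih => rw [List.foldl_cons, ih, List.flatten_cons, PySem.Set.update_append]

theorem pv_allm_eq (xs : List String) :
    pvGetAllMinterms xs = PySem.Set.ofList (pvMems xs) := by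
  unfold pvGetAllMinterms
  have h1 : xs.foldl (fun acc impl => PySem.Set.update acc (pvExpandImplicantA impl)) PySem.Set.empty
      = (xs.map pvExpand).foldl (fun s ms => PySem.Set.update s ms) PySem.Set.empty := by
    rw [List.foldl_map]
    exact PySem.List.foldl_congr_mem _ _ _ _ (fun acc x _ => by rw [pv_expand_eq])
  rw [h1, pv_foldl_update]
  rw [show (PySem.Set.empty : PySem.Set String) = [] from rfl, PySem.Set.update_nil_left]
  rfl

theorem pv_pairs_fst (xs : List String) : (pvPairs xs).map (·.1) = pvMems xs := by
  unfold pvPairs pvMems pvExps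
  rw [List.map_flatMap]
  have : (fun (p : Int × String) => List.map (fun x => Prod.fst x) (List.map (fun m => ((m, p.1) : String × Int)) (pvExpand p.2)))
      = fun (p : Int × String) => pvExpand p.2 := by
    funext p; simp [Function.comp_def]
  rw [this]
  have h2 : (PySem.List.enumerate xs).flatMap (fun p => pvExpand p.2)
      = ((PySem.List.enumerate xs).map (·.2)).flatMap pvExpand := by
    rw [List.flatMap_map]
  rw [h2, pv_enum_map_snd, List.flatMap_def]

theorem pv_covdict_fold (xs : List String) :
    pvCovDict xs = (pvPairs xs).foldl (fun d q => d.modify q.1 [] (· ++ [q.2]))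
      ((PySem.Set.ofList (pvMems xs)).foldl (fun d m => d.insert m []) PySem.Dict.empty) := by
  unfold pvCovDict pvPairs
  rw [List.flatMap_def, List.foldl_flatten, List.foldl_map]
  congr 1
  funext d p
  rw [List.foldl_map]

theorem pv_c0_getD (l : List String) (d : PySem.Dict String (List Int)) (m : String)
    (h : d.getD m [] = []) :
    (l.foldl (fun d k => d.insert k ([] : List Int)) d).getD m [] = [] := by
  induction l generalizing d with
  | nil => exact h
  | cons k t ih =>
    rw [List.foldl_cons]
    exact ih _ (by rw [PySem.Dict.getD_insert]; split <;> simp [h])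

theorem pv_covdict_getD (xs : List String) (m : String) :
    (pvCovDict xs).getD m [] = pvCovList xs m := by
  rw [pv_covdict_fold, PySem.Dict.getD_foldl_modify_append,
      pv_c0_getD _ _ _ (PySem.Dict.getD_empty m [])]
  rfl

theorem pv_covdict_keys (xs : List String) :
    (pvCovDict xs).keys = PySem.Set.ofList (pvMems xs) := by
  rw [pv_covdict_fold, PySem.Dict.keys_foldl_modify_key, PySem.Dict.keys_foldl_insert,
      PySem.Dict.keys_empty, PySem.Set.update_nil_left, PySem.Set.ofList_ofList, pv_pairs_fst]
  rw [PySem.Set.update_eq_append_filter]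
  have h0 : ((PySem.Set.ofList (pvMems xs)).filter (fun y => !(PySem.Set.ofList (pvMems xs)).contains y)) = [] := by
    rw [List.filter_eq_nil_iff]
    intro a ha
    simp [ha]
  rw [h0, List.append_nil]

theorem pv_covlist_len (xs : List String) (m : String) :
    (pvCovList xs m).length = (pvMems xs).count m := by
  unfold pvCovList
  rw [List.length_map, ← List.countP_eq_length_filter, ← pv_pairs_fst,
      List.count_eq_countP, List.countP_map]
  rfl

theorem pv_mem_covlist (xs : List String) (m : String) (i : Int) :
    i ∈ pvCovList xs m ↔ (m, i) ∈ pvPairs xs := by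
  unfold pvCovList
  simp only [List.mem_map, List.mem_filter, beq_iff_eq]
  constructor
  · rintro ⟨⟨m', i'⟩, ⟨hmem, rfl⟩, rfl⟩; exact hmem
  · intro h; exact ⟨(m, i), ⟨h, rfl⟩, rfl⟩

theorem pv_mem_pairs (xs : List String) (m : String) (i : Int) :
    (m, i) ∈ pvPairs xs ↔ ∃ j : ℕ, ∃ h : j < xs.length, i = j ∧ m ∈ pvExpand xs[j] := by
  unfold pvPairs
  simp only [List.mem_flatMap, pv_mem_enum, List.mem_map, Prod.mk.injEq]
  constructor
  · rintro ⟨p, ⟨j, h, rfl⟩, m', hm', rfl, rfl⟩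
    exact ⟨j, h, by simp, hm'⟩
  · rintro ⟨j, h, rfl, hm⟩
    exact ⟨((j : Int), xs[j]), ⟨j, h, by simp⟩, m, hm, rfl, by simp⟩

theorem pv_mem_mems (xs : List String) (m : String) :
    m ∈ pvMems xs ↔ ∃ j : ℕ, ∃ h : j < xs.length, m ∈ pvExpand xs[j] := by
  unfold pvMems pvExps
  simp only [List.mem_flatten, List.mem_map]
  constructor
  · rintro ⟨l, ⟨s, hs, rfl⟩, hm⟩
    obtain ⟨j, h, rfl⟩ := List.mem_iff_getElem.mp hs
    exact ⟨j, h, hm⟩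
  · rintro ⟨j, h, hm⟩
    exact ⟨pvExpand xs[j], ⟨xs[j], List.getElem_mem h, rfl⟩, hm⟩

def pvListA (xs : List String) : List Int :=
  ((pvCovDict xs).items.filter (fun p => decide (p.2.length = 1))).map (fun p => p.2.getD 0 0)
def pvListB (xs : List String) : List Int :=
  ((PySem.List.enumerate (pvExps xs)).filter (fun p => p.2.any (fun m => (pvCounts xs).getD m 0 == 1))).map (·.1)

theorem pv_singleton_char (l : List Int) (i : Int) :
    (l.length = 1 ∧ l.getD 0 0 = i) ↔ l = [i] := by
  match l with
  | [] => simp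
  | [a] => simp [List.getD]
  | a :: b :: t => simp

theorem pv_mem_listA (xs : List String) (i : Int) :
    i ∈ pvListA xs ↔ ∃ m ∈ pvMems xs, pvCovList xs m = [i] := by
  unfold pvListA
  have hnd : (pvCovDict xs).keys.Nodup := by
    rw [pv_covdict_keys]; exact PySem.Set.nodup_ofList _
  rw [PySem.Dict.items_eq_map_keys _ hnd []]
  simp only [List.mem_map, List.mem_filter, pv_covdict_keys, decide_eq_true_eq]
  constructor
  · rintro ⟨p, ⟨⟨m', hm', rfl⟩, hlen⟩, hi⟩
    refine ⟨m', (PySem.Set.mem_ofList _ _).mp hm', ?_⟩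
    rw [← pv_covdict_getD]
    exact (pv_singleton_char _ _).mp ⟨by simpa using hlen, by simpa using hi⟩
  · rintro ⟨m, hm, hL⟩
    refine ⟨(m, (pvCovDict xs).getD m []), ⟨⟨m, (PySem.Set.mem_ofList _ _).mpr hm, rfl⟩, ?_⟩, ?_⟩
    · simp [pv_covdict_getD, hL]
    · simp [pv_covdict_getD, hL]

theorem pv_mem_listB (xs : List String) (i : Int) :
    i ∈ pvListB xs ↔ ∃ j : ℕ, ∃ h : j < xs.length, i = j ∧ ∃ m ∈ pvExpand xs[j], (pvMems xs).count m = 1 := by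
  unfold pvListB
  simp only [List.mem_map, List.mem_filter, pv_mem_enum, List.any_eq_true, pv_counts_getD]
  constructor
  · rintro ⟨⟨i', ms⟩, ⟨⟨j, h, heq⟩, m, hm, hc⟩, rfl⟩
    obtain ⟨rfl, rfl⟩ : i' = (j : Int) ∧ ms = (pvExps xs)[j] := by
      simpa [Prod.ext_iff] using heq
    refine ⟨j, by simpa [pvExps] using h, rfl, m, ?_, ?_⟩
    · simpa [pvExps] using hm
    · rw [beq_iff_eq] at hc; exact_mod_cast hc
  · rintro ⟨j, h, rfl, m, hm, hc⟩
    refine ⟨((j : Int), (pvExps xs)[j]'(by simpa [pvExps] using h)), ⟨⟨j, by simpa [pvExps] using h, by simp⟩, m, ?_, ?_⟩, rfl⟩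
    · simpa [pvExps] using hm
    · simp [hc]

theorem pv_len_one_mem {l : List Int} {i : Int} (hlen : l.length = 1) (hi : i ∈ l) : l = [i] := by
  match l with
  | [a] => rw [List.mem_singleton.mp hi]

theorem pv_mem_iff (xs : List String) (i : Int) : i ∈ pvListA xs ↔ i ∈ pvListB xs := by
  rw [pv_mem_listA, pv_mem_listB]
  constructor
  · rintro ⟨m, hm, hL⟩
    have hc : (pvMems xs).count m = 1 := by
      rw [← pv_covlist_len, hL]; rfl
    have hiL : i ∈ pvCovList xs m := by rw [hL]; exact List.mem_singleton.mpr rfl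
    obtain ⟨j, h, rfl, hmj⟩ := (pv_mem_pairs xs m i).mp ((pv_mem_covlist xs m i).mp hiL)
    exact ⟨j, h, rfl, m, hmj, hc⟩
  · rintro ⟨j, h, rfl, m, hm, hc⟩
    have hpm : m ∈ pvMems xs := (pv_mem_mems xs m).mpr ⟨j, h, hm⟩
    have hiL : ((j : Int)) ∈ pvCovList xs m :=
      (pv_mem_covlist xs m j).mpr ((pv_mem_pairs xs m j).mpr ⟨j, h, rfl, hm⟩)
    have hlen : (pvCovList xs m).length = 1 := by rw [pv_covlist_len, hc]
    exact ⟨m, hpm, pv_len_one_mem hlen hiL⟩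

theorem pv_set_fold (d : PySem.Dict String (List Int)) :
    d.items.foldl (fun s p => if p.2.length = 1 then PySem.Set.add s (p.2.getD 0 0) else s) PySem.Set.empty
      = PySem.Set.ofList ((d.items.filter (fun p => decide (p.2.length = 1))).map (fun p => p.2.getD 0 0)) := by
  rw [PySem.List.foldl_ite_eq_foldl_filter (fun (p : String × List Int) => p.2.length = 1),
      ← PySem.Set.update_map_eq_foldl_add,
      show (PySem.Set.empty : PySem.Set Int) = ([] : PySem.Set Int) from rfl,
      PySem.Set.update_nil_left]

theorem pv_sorted_AB (xs : List String) :
    PySem.List.sorted (PySem.Set.ofList (pvListA xs)) (fun x => x) false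
      = PySem.List.sorted (PySem.Set.ofList (pvListB xs)) (fun x => x) false := by
  apply PySem.List.eq_of_perm_of_pairwise_le_of_injective (fun (x : Int) => x) (fun _ _ h => h)
  · refine ((PySem.List.sorted_perm _ _ _).trans ?_).trans (PySem.List.sorted_perm _ _ _).symm
    rw [List.perm_ext_iff_of_nodup (PySem.Set.nodup_ofList _) (PySem.Set.nodup_ofList _)]
    intro a
    rw [PySem.Set.mem_ofList, PySem.Set.mem_ofList]
    exact pv_mem_iff xs a
  · exact PySem.List.sorted_pairwise _ _
  · exact PySem.List.sorted_pairwise _ _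

theorem pv_essA_eq (xs : List String) :
    pvFindEssentialA xs (pvGetAllMinterms xs) = pvEssB xs := by
  simp only [pvFindEssentialA]
  rw [pv_allm_eq]
  have hcov : (PySem.List.enumerate xs).foldl
      (fun d p => (pvExpandImplicantA p.2).foldl (fun d m => d.modify m [] (· ++ [p.1])) d)
      ((PySem.Set.ofList (pvMems xs)).foldl (fun d m => d.insert m []) PySem.Dict.empty)
      = pvCovDict xs := by
    unfold pvCovDict
    exact PySem.List.foldl_congr_mem _ _ _ _ (fun acc p _ => by rw [pv_expand_eq])
  rw [hcov, pv_set_fold]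
  show PySem.List.sorted (PySem.Set.ofList (pvListA xs)) (fun x => x) false = pvEssB xs
  rw [pv_sorted_AB]
  rfl

def pvCov (xs : List String) : PySem.Set String :=
  (pvEssB xs).foldl (fun acc i => PySem.Set.update acc (PySem.List.pyGetD (pvExps xs) i [])) PySem.Set.empty
def pvRem (xs : List String) : PySem.Set String :=
  PySem.Set.ofList ((pvCounts xs).keys.filter (fun m => !(PySem.Set.contains (pvCov xs) m)))
def pvRestIdx (xs : List String) : List Int :=
  (PySem.List.pyRange 0 (PySem.List.len xs) 1).filter (fun i => decide (i ∉ pvEssB xs))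

theorem pv_ess_range (xs : List String) (i : Int) (h : i ∈ pvEssB xs) :
    ∃ j : ℕ, j < xs.length ∧ i = (j : Int) := by
  have : i ∈ pvListB xs := by
    have hp := PySem.List.sorted_perm
      (PySem.Set.ofList (pvListB xs)) (fun (x : Int) => x) false
    have : i ∈ PySem.Set.ofList (pvListB xs) := hp.mem_iff.mp h
    exact (PySem.Set.mem_ofList _ _).mp this
  obtain ⟨j, hj, rfl, _⟩ := (pv_mem_listB xs i).mp this
  exact ⟨j, hj, rfl⟩

theorem pv_getD_bridge (xs : List String) (j : ℕ) (hj : j < xs.length) :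
    PySem.List.pyGetD (pvExps xs) (j : Int) [] = pvExpand (PySem.List.pyGetD xs (j : Int) "") := by
  rw [PySem.List.pyGetD_natCast, PySem.List.pyGetD_natCast]
  unfold pvExps
  rw [List.getD_eq_getElem?_getD, List.getD_eq_getElem?_getD, List.getElem?_map,
      List.getElem?_eq_getElem hj]
  rfl

theorem pv_covA_eq (xs : List String) :
    (pvEssB xs).foldl (fun acc i => PySem.Set.update acc (pvExpand (PySem.List.pyGetD xs i ""))) PySem.Set.empty
      = pvCov xs := by
  unfold pvCov
  refine (PySem.List.foldl_congr_mem _ _ _ _ ?_).symm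
  intro acc i hi
  obtain ⟨j, hj, rfl⟩ := pv_ess_range xs i hi
  rw [pv_getD_bridge xs j hj]

theorem pv_remA_eq (xs : List String) :
    PySem.Set.diff (PySem.Set.ofList (pvMems xs)) (pvCov xs) = pvRem xs := by
  unfold pvRem
  rw [pv_counts_keys]
  have hfe : ((PySem.Set.ofList (pvMems xs)).filter (fun m => !(PySem.Set.contains (pvCov xs) m)))
      = PySem.Set.diff (PySem.Set.ofList (pvMems xs)) (pvCov xs) := by
    simp [PySem.Set.diff]
  rw [hfe]
  refine (PySem.Set.ofList_eq_self_of_nodup _ ?_).symm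
  have : (PySem.Set.diff (PySem.Set.ofList (pvMems xs)) (pvCov xs)).Nodup :=
    PySem.Set.nodup_diff _ _ (PySem.Set.nodup_ofList _)
  exact this

theorem pv_findSome?_congr_mem {α β : Type} (l : List α) (f g : α → Option β)
    (h : ∀ x ∈ l, f x = g x) : l.findSome? f = l.findSome? g := by
  induction l with
  | nil => rfl
  | cons x t ih =>
    rw [List.findSome?_cons, List.findSome?_cons, h x (List.mem_cons_self), ih (fun y hy => h y (List.mem_cons_of_mem _ hy))]

theorem pv_findSome?_opt_map {α β γ : Type} (l : List α) (g : α → Option β) (h : β → γ) :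
    l.findSome? (fun x => (g x).map h) = (l.findSome? g).map h := by
  induction l with
  | nil => rfl
  | cons x t ih =>
    rw [List.findSome?_cons, List.findSome?_cons]
    cases g x <;> simp [ih]

theorem pv_selfmap (l : List Int) :
    (PySem.List.pyRange 0 ((l.length : Int)) 1).map (fun p => PySem.List.pyGetD l p 0) = l := by
  rw [PySem.List.pyRange_zero_nat, List.map_map]
  have : ((fun p => PySem.List.pyGetD l p 0) ∘ fun (k : ℕ) => (k : Int)) = fun (k : ℕ) => l.getD k 0 := by
    funext k
    simp [PySem.List.pyGetD_natCast]
  rw [this]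
  apply List.ext_getElem
  · simp
  · intro i h1 h2
    simp [List.getD_eq_getElem?_getD, h2]

theorem pv_restidx_range (xs : List String) (i : Int) (h : i ∈ pvRestIdx xs) :
    ∃ j : ℕ, j < xs.length ∧ i = (j : Int) := by
  unfold pvRestIdx at h
  have := (List.mem_filter.mp h).1
  rw [PySem.List.len_eq] at this
  have hb := PySem.List.mem_pyRange_one.mp this
  exact ⟨i.toNat, by omega, by omega⟩

theorem pv_search_eq (xs : List String) :
    (PySem.List.pyRange 1 (PySem.List.len (pvRestIdx xs) + 1) 1).findSome? (fun r =>
      (PySem.List.combinations (pvRestIdx xs) r.toNat).findSome? (fun combo =>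
        if PySem.Set.issubset (pvRem xs)
            (combo.foldl (fun acc i => PySem.Set.update acc (PySem.List.pyGetD (pvExps xs) i [])) PySem.Set.empty) then
          some ((pvEssB xs).map (fun i => PySem.List.pyGetD xs i "") ++ combo.map (fun i => PySem.List.pyGetD xs i ""))
        else none))
    = Option.map (fun chosen => (pvEssB xs).map (fun i => PySem.List.pyGetD xs i "") ++ chosen)
      ((PySem.List.pyRange 1 (PySem.List.len ((pvRestIdx xs).map (fun i => PySem.List.pyGetD xs i "")) + 1) 1).findSome? (fun r =>
        (PySem.List.combinations (PySem.List.pyRange 0 (PySem.List.len ((pvRestIdx xs).map (fun i => PySem.List.pyGetD xs i ""))) 1) r.toNat).findSome? (fun combo =>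
          if PySem.Set.issubset (PySem.Set.ofList (pvRem xs))
              (combo.foldl (fun acc idx => PySem.Set.update acc (pvExpand (PySem.List.pyGetD ((pvRestIdx xs).map (fun i => PySem.List.pyGetD xs i "")) idx ""))) PySem.Set.empty) then
            some (combo.map (fun i => PySem.List.pyGetD ((pvRestIdx xs).map (fun i => PySem.List.pyGetD xs i "")) i ""))
          else none))) := by
  have hlen : PySem.List.len ((pvRestIdx xs).map (fun i => PySem.List.pyGetD xs i ""))
      = PySem.List.len (pvRestIdx xs) := by
    rw [PySem.List.len_eq, PySem.List.len_eq, List.length_map]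
  rw [hlen]
  rw [← pv_findSome?_opt_map]
  apply pv_findSome?_congr_mem
  intro r _
  -- fix the combinations list on the left to be combinations over positions
  conv_lhs => rw [show pvRestIdx xs
      = (PySem.List.pyRange 0 (((pvRestIdx xs).length : Int)) 1).map (fun p => PySem.List.pyGetD (pvRestIdx xs) p 0)
      from (pv_selfmap _).symm]
  rw [PySem.List.combinations_map, List.findSome?_map, PySem.List.len_eq,
      ← pv_findSome?_opt_map]
  apply pv_findSome?_congr_mem
  intro c hc
  have hmemc : ∀ idx ∈ c, 0 ≤ idx ∧ idx < ((pvRestIdx xs).length : Int) := by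
    intro idx hidx
    have hsub := PySem.List.sublist_of_mem_combinations hc
    have : idx ∈ PySem.List.pyRange 0 ((pvRestIdx xs).length : Int) 1 := hsub.mem hidx
    have := PySem.List.mem_pyRange_one.mp this
    exact ⟨this.1, this.2⟩
  -- pointwise facts about a position idx ∈ c
  have hval : ∀ idx ∈ c, PySem.List.pyGetD ((pvRestIdx xs).map (fun i => PySem.List.pyGetD xs i "")) idx ""
      = PySem.List.pyGetD xs (PySem.List.pyGetD (pvRestIdx xs) idx 0) "" := by
    intro idx hidx
    obtain ⟨h0, h1⟩ := hmemc idx hidx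
    rw [PySem.List.pyGetD_eq_getElem _ _ h0 (by rw [List.length_map]; exact_mod_cast h1),
        PySem.List.pyGetD_eq_getElem _ _ h0 (by exact_mod_cast h1)]
    rw [List.getElem_map]
  have hexp : ∀ idx ∈ c, PySem.List.pyGetD (pvExps xs) (PySem.List.pyGetD (pvRestIdx xs) idx 0) []
      = pvExpand (PySem.List.pyGetD xs (PySem.List.pyGetD (pvRestIdx xs) idx 0) "") := by
    intro idx hidx
    obtain ⟨h0, h1⟩ := hmemc idx hidx
    have hmem : PySem.List.pyGetD (pvRestIdx xs) idx 0 ∈ pvRestIdx xs := by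
      rw [PySem.List.pyGetD_eq_getElem _ _ h0 (by exact_mod_cast h1)]
      exact List.getElem_mem _
    obtain ⟨j, hj, hij⟩ := pv_restidx_range xs _ hmem
    rw [hij]
    exact pv_getD_bridge xs j hj
  simp only [Function.comp_apply]
  rw [List.foldl_map, List.map_map]
  rw [PySem.List.foldl_congr_mem c _
      (fun acc idx => PySem.Set.update acc (pvExpand (PySem.List.pyGetD ((pvRestIdx xs).map (fun i => PySem.List.pyGetD xs i "")) idx ""))) _
      (by
        intro acc idx hidx
        rw [hexp idx hidx, ← hval idx hidx])]
  rw [List.map_congr_left (l := c)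
      (f := (fun i => PySem.List.pyGetD xs i "") ∘ fun p => PySem.List.pyGetD (pvRestIdx xs) p 0)
      (g := fun i => PySem.List.pyGetD ((pvRestIdx xs).map (fun i => PySem.List.pyGetD xs i "")) i "")
      (by intro idx hidx; simp only [Function.comp_apply]; rw [hval idx hidx])]
  rw [show PySem.Set.ofList (pvRem xs) = pvRem xs from
      PySem.Set.ofList_eq_self_of_nodup _ (by unfold pvRem; exact PySem.Set.nodup_ofList _)]
  split <;> rfl

def pvTail (xs : List String) : List String :=
  if pvRem xs = [] then (pvEssB xs).map (fun i => PySem.List.pyGetD xs i "")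
  else
    match (PySem.List.pyRange 1 (PySem.List.len (pvRestIdx xs) + 1) 1).findSome? (fun r =>
      (PySem.List.combinations (pvRestIdx xs) r.toNat).findSome? (fun combo =>
        if PySem.Set.issubset (pvRem xs)
            (combo.foldl (fun acc i => PySem.Set.update acc (PySem.List.pyGetD (pvExps xs) i [])) PySem.Set.empty) then
          some ((pvEssB xs).map (fun i => PySem.List.pyGetD xs i "") ++ combo.map (fun i => PySem.List.pyGetD xs i ""))
        else none)) with
    | some res => res
    | none => xs

theorem pv_alt_norm (xs : List String) : minimize_implicants_alt xs = pvTail xs := rfl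

theorem pv_match_opt (e ys : List String) (o : Option (List String)) :
    (match Option.map (fun chosen => e ++ chosen) o with
      | some res => res
      | none => ys)
    = match o with
      | some chosen => e ++ chosen
      | none => ys := by
  cases o <;> rfl

theorem pv_A_norm (xs : List String) : minimize_implicants xs = pvTail xs := by
  simp only [minimize_implicants]
  rw [pv_essA_eq]
  simp only [pv_expand_eq]
  rw [pv_covA_eq, pv_allm_eq, pv_remA_eq]
  rw [show (PySem.List.pyRange 0 (PySem.List.len xs) 1).filter (fun i => decide (i ∉ pvEssB xs))
      = pvRestIdx xs from rfl]
  show (if pvRem xs = [] then (pvEssB xs).map (fun i => PySem.List.pyGetD xs i "")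
    else _) = pvTail xs
  unfold pvTail
  by_cases hrem : pvRem xs = []
  · rw [if_pos hrem, if_pos hrem]
  · rw [if_neg hrem, if_neg hrem, pv_search_eq, pv_match_opt]

theorem pv_main (xs : List String) : minimize_implicants xs = minimize_implicants_alt xs := by
  rw [pv_A_norm, pv_alt_norm]

-- ===== VERDICT (by name: the statement is the Claim_ definition above) =====
theorem minimize_implicants_spec : Claim_equal_minimize_implicants := by
  intro implicants_str _
  unfold Spec_minimize_implicants
  exact pv_main implicants_str
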